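-- pv_equiv track=rewrite | github.com/Sonaion/py-sonaion-analysis | sonaion_analysis/eyetracking/metrics.py | count_saccades
-- ===== SOURCE A (Python) =====
-- def count_saccades(saccades):
--     """
--     A Function that counts the number of distinct saccades
--
--     :param saccades:    a list with values which indicate if the move from the previos is a saccade.
--     :return:            a number of indicating the amount of different saccades
--     """
--     saccade_count = 0
--     is_currently = False
--     for value in saccades:
--         if value == 1 and is_currently == False:
--             saccade_count +=1
--             is_currently = True
--         if value == 0 and is_currently == True:
--             is_currently = False
--     return saccade_count
-- ===== SOURCE B (Python) =====
-- def count_saccades(saccades):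
--     cleaned = [v for v in saccades if v == 0 or v == 1]
--     return sum(1 for prev, cur in zip([0] + cleaned, cleaned) if prev == 0 and cur == 1)
-- ===== Notes on version B (the rewrite author's own statement) =====
-- stated objective: idiomatic
-- what changed: Replaces the toggle-flag state machine with a filter pass (non-0/1 values are transparent) followed by counting rising 0->1 edges via zip against the shifted sequence.
import Mathlib
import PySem

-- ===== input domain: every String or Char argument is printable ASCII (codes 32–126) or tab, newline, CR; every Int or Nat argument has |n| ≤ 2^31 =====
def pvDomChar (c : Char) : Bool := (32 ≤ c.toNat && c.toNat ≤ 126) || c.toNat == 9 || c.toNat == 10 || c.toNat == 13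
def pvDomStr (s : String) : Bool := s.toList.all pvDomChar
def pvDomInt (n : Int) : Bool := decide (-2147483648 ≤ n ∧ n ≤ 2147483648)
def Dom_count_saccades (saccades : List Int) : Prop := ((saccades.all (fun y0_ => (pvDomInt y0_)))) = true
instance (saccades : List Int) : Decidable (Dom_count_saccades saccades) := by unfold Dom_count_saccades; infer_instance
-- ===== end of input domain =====

-- B replaces A's toggle-flag state machine by a filter to 0/1 values plus counting 0->1 rising edges (idiomatic; same cost).


-- ===== PORT A =====
-- one loop step of A: two sequential if-statements updating (saccade_count, is_currently)
def pvStepA (st : Int × Bool) (value : Int) : Int × Bool :=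
  let st := if value = 1 ∧ st.2 = false then (st.1 + 1, true) else st
  if value = 0 ∧ st.2 = true then (st.1, false) else st

def count_saccades (saccades : List Int) : Int :=
  (saccades.foldl pvStepA (0, false)).1

-- ===== PORT B =====
def count_saccades_alt (saccades : List Int) : Int :=
  let cleaned := saccades.filter (fun v => v == 0 || v == 1)
  (((((0 : Int) :: cleaned).zip cleaned).countP (fun p => p.1 == 0 && p.2 == 1) : Nat) : Int)

-- ===== PRECONDITION & SPEC =====
def Spec_count_saccades (saccades : List Int) (out : Int) : Prop := out = count_saccades_alt saccades
instance (saccades : List Int) (out : Int) : Decidable (Spec_count_saccades saccades out) := by unfold Spec_count_saccades; infer_instance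

-- ===== CLAIM (what is proved, stated in full; the proofs are below) =====
def Claim_equal_count_saccades : Prop := ∀ (saccades : List Int), Dom_count_saccades saccades → Spec_count_saccades saccades (count_saccades saccades)

-- ===== LEMMAS AND PROOFS =====

-- run-count of B starting from a "previous value" p
def pvRuns (p : Int) (cleaned : List Int) : Int :=
  ((((p :: cleaned).zip cleaned).countP (fun q => q.1 == 0 && q.2 == 1) : Nat) : Int)

lemma pvRuns_nil (p : Int) : pvRuns p [] = 0 := by simp [pvRuns]

lemma pvRuns_cons (p y : Int) (ys : List Int) :
    pvRuns p (y :: ys) = (if p == 0 && y == 1 then 1 else 0) + pvRuns y ys := by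
  simp [pvRuns, List.zip, List.countP_cons]
  split_ifs <;> omega

-- loop invariant: A's fold from state (c, b) equals c plus B's run count over the
-- filtered remainder, with b encoded as the previous value (true ↦ 1, false ↦ 0)
lemma key (xs : List Int) : ∀ (c : Int) (b : Bool),
    (xs.foldl pvStepA (c, b)).1
      = c + pvRuns (if b then 1 else 0) (xs.filter (fun v => v == 0 || v == 1)) := by
  induction xs with
  | nil => intro c b; simp [pvRuns_nil]
  | cons x xs ih =>
    intro c b
    by_cases h1 : x = 1
    · subst h1
      cases b with
      | false =>
        simp [List.foldl_cons, pvStepA, ih, pvRuns_cons]; ring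
      | true =>
        simp [List.foldl_cons, pvStepA, ih, pvRuns_cons]
    · by_cases h0 : x = 0
      · subst h0
        cases b <;> simp [List.foldl_cons, pvStepA, ih, pvRuns_cons]
      · have hf : (x == 0 || x == 1) = false := by
          simp [h0, h1]
        simp [List.foldl_cons, pvStepA, h0, h1, ih, hf]

-- ===== VERDICT (by name: the statement is the Claim_ definition above) =====
theorem count_saccades_spec : Claim_equal_count_saccades := by
  intro saccades _
  unfold Spec_count_saccades count_saccades count_saccades_alt
  rw [key]
  simp [pvRuns]
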